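-- pv_equiv track=rewrite | github.com/XyzHuy/-DL-Fine-tuning-coding-model | data/solution/Solution2168.py | equalDigitFrequency
-- ===== SOURCE A (Python) =====
-- def equalDigitFrequency(s: str) -> int:
--     from collections import Counter
--
--     def is_valid(counter):
--         freq = counter.most_common(1)[0][1]
--         return all(v == freq for v in counter.values())
--
--     unique_substrings = set()
--
--     for start in range(len(s)):
--         counter = Counter()
--         for end in range(start, len(s)):
--             counter[s[end]] += 1
--             if is_valid(counter):
--                 unique_substrings.add(s[start:end+1])
--
--     return len(unique_substrings)
-- ===== SOURCE B (Python) =====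
-- def equalDigitFrequency(s: str) -> int:
--     from collections import Counter
--
--     n = len(s)
--     subs = {s[i:j] for i in range(n) for j in range(i + 1, n + 1)}
--
--     def valid(t):
--         return len(set(Counter(t).values())) == 1
--
--     return sum(1 for t in subs if valid(t))
-- ===== Notes on version B (the rewrite author's own statement) =====
-- stated objective: simpler
-- what changed: Replaces the incremental per-start Counter scan that validates while generating with a generate-then-filter pipeline: build the set of all distinct substrings with a comprehension, then count those whose Counter has a single distinct frequency value.
import Mathlib
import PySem

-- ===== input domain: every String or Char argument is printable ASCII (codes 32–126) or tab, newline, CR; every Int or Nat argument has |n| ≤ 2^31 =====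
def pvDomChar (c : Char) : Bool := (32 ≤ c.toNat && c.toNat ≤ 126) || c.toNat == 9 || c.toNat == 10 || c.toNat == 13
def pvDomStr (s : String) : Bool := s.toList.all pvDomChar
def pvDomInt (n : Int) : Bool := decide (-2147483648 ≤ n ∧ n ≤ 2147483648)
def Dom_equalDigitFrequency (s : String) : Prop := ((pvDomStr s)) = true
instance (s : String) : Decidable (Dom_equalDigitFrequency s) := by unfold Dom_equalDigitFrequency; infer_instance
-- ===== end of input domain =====

-- B replaces A's incremental per-start Counter scan by a generate-then-filter pipeline
-- (build the set of all distinct substrings, then count the valid ones); objective: simpler.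

-- ===== PORT A =====
-- is_valid(counter): freq = counter.most_common(1)[0][1]; all(v == freq for v in counter.values())
-- (most_common(1) = sorted(items, key=count, reverse=True)[:1]; on an empty counter Python would
--  raise IndexError — the `none` branch is unreachable: A only calls is_valid after an increment)
def pvIsValidA (counter : PySem.Dict Char Int) : Bool :=
  match (PySem.List.sorted counter.items (fun p => p.2) true).head? with
  | none => false
  | some kv => counter.values.all (fun v => v == kv.2)

-- one step of A's inner loop: counter[s[end]] += 1; if is_valid(counter): add s[start:end+1]
-- (pyGet? returning none is unreachable: end ranges over [start, len(s)))
def pvStepA (cs : List Char) (start : Int)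
    (st : PySem.Dict Char Int × PySem.Set (List Char)) (e : Int) :
    PySem.Dict Char Int × PySem.Set (List Char) :=
  match PySem.List.pyGet? cs e with
  | none => st
  | some c =>
    let counter := st.1.modify c 0 (· + 1)
    if pvIsValidA counter then
      (counter, PySem.Set.add st.2 (PySem.List.slice cs (some start) (some (e + 1))))
    else
      (counter, st.2)

def equalDigitFrequency (s : String) : Int :=
  let cs := s.toList
  let uniq : PySem.Set (List Char) :=
    (PySem.List.pyRange 0 (PySem.Str.len s) 1).foldl
      (fun u start =>
        ((PySem.List.pyRange start (PySem.Str.len s) 1).foldl (pvStepA cs start)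
          (PySem.Dict.empty, u)).2)
      PySem.Set.empty
  PySem.Set.len uniq

-- ===== PORT B =====
-- valid(t): len(set(Counter(t).values())) == 1
def pvValidB (t : List Char) : Bool :=
  PySem.Set.len (PySem.Set.ofList (PySem.Dict.counter t).values) == 1

def equalDigitFrequency_alt (s : String) : Int :=
  let cs := s.toList
  -- subs = {s[i:j] for i in range(n) for j in range(i+1, n+1)}
  let subs : PySem.Set (List Char) :=
    (PySem.List.pyRange 0 (PySem.Str.len s) 1).foldl
      (fun u i =>
        (PySem.List.pyRange (i + 1) (PySem.Str.len s + 1) 1).foldl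
          (fun u j => PySem.Set.add u (PySem.List.slice cs (some i) (some j))) u)
      PySem.Set.empty
  -- sum(1 for t in subs if valid(t)) — a 0/1 sum over a set, order-independent
  ((subs.filter pvValidB).length : Int)

-- ===== PRECONDITION & SPEC =====
def Spec_equalDigitFrequency (s : String) (out : Int) : Prop := out = equalDigitFrequency_alt s
instance (s : String) (out : Int) : Decidable (Spec_equalDigitFrequency s out) := by unfold Spec_equalDigitFrequency; infer_instance

-- ===== CLAIM (what is proved, stated in full; the proofs are below) =====
def Claim_equal_equalDigitFrequency : Prop := ∀ (s : String), Dom_equalDigitFrequency s → Spec_equalDigitFrequency s (equalDigitFrequency s)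

-- ===== LEMMAS AND PROOFS =====

-- set(l) has exactly one element iff l is nonempty and all its elements are equal
lemma pvSetLenOne (l : List Int) :
    (PySem.Set.len (PySem.Set.ofList l) == 1) = true ↔
      l ≠ [] ∧ ∀ x ∈ l, ∀ y ∈ l, x = y := by
  have hlen : (PySem.Set.len (PySem.Set.ofList l) == 1) = true ↔ (PySem.Set.ofList l).length = 1 := by
    simp [PySem.Set.len]
  rw [hlen, List.length_eq_one_iff]
  constructor
  · rintro ⟨a, ha⟩
    have hm : ∀ x ∈ l, x = a := by
      intro x hx
      have : x ∈ PySem.Set.ofList l := (PySem.Set.mem_ofList l x).mpr hx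
      rw [ha] at this; simpa using this
    refine ⟨?_, fun x hx y hy => (hm x hx).trans (hm y hy).symm⟩
    intro h; subst h; simp [PySem.Set.ofList] at ha
  · rintro ⟨hne, hall⟩
    obtain ⟨a, rest, rfl⟩ := List.exists_cons_of_ne_nil hne
    refine ⟨a, ?_⟩
    rw [PySem.Set.ofList_cons]
    have : (PySem.Set.ofList rest).discard a = [] := by
      rw [List.eq_nil_iff_forall_not_mem]
      intro y hy
      obtain ⟨hy1, hy2⟩ := (PySem.Set.mem_discard _ _ _).mp hy
      have : y ∈ rest := (PySem.Set.mem_ofList rest y).mp hy1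
      exact hy2 (hall y (List.mem_cons_of_mem a this) a (List.mem_cons_self))
    rw [this]

-- A's is_valid on any counter dict: true iff the values are nonempty and all equal
lemma pvIsValidA_iff (d : PySem.Dict Char Int) :
    pvIsValidA d = true ↔ d.values ≠ [] ∧ ∀ x ∈ d.values, ∀ y ∈ d.values, x = y := by
  unfold pvIsValidA
  cases h : (PySem.List.sorted d.items (fun p => p.2) true).head? with
  | none =>
    have hnil : d.items = [] := by
      rw [← PySem.List.sorted_eq_nil_iff d.items (fun p => p.2) true]
      exact List.head?_eq_none_iff.mp h
    have hv : d.values = [] := by simp [PySem.Dict.values, hnil]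
    simp [hv]
  | some kv =>
    have hkv : kv ∈ d.items := by
      have : kv ∈ PySem.List.sorted d.items (fun p => p.2) true := List.mem_of_mem_head? h
      exact (PySem.List.mem_sorted _ _ _ _).mp this
    have hv2 : kv.2 ∈ d.values := by
      simp only [PySem.Dict.values]
      exact List.mem_map_of_mem hkv
    simp only [List.all_eq_true, beq_iff_eq]
    constructor
    · intro hall
      refine ⟨by intro h0; rw [h0] at hv2; simp at hv2,
        fun x hx y hy => (hall x hx).trans (hall y hy).symm⟩
    · rintro ⟨-, hall⟩
      intro x hx
      exact hall x hx kv.2 hv2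

-- A's validity test on Counter(t) coincides with B's validity test on t
lemma pvIsValidA_counter (t : List Char) :
    pvIsValidA (PySem.Dict.counter t) = pvValidB t := by
  rw [Bool.eq_iff_iff]
  simp only [pvValidB]
  rw [pvIsValidA_iff, pvSetLenOne]

-- generic membership through a foldl whose step's membership is characterised
lemma pvFoldlMem {α β : Type} [BEq α] [LawfulBEq α]
    (l : List β) (F : PySem.Set α → β → PySem.Set α) (Q : β → α → Prop)
    (hF : ∀ u b, b ∈ l → ∀ t, t ∈ F u b ↔ t ∈ u ∨ Q b t) :
    ∀ u t, t ∈ l.foldl F u ↔ t ∈ u ∨ ∃ b ∈ l, Q b t := by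
  induction l with
  | nil => simp
  | cons x xs ih =>
    intro u t
    rw [List.foldl_cons, ih (fun u b hb => hF u b (List.mem_cons_of_mem x hb)) (F u x) t,
      hF u x List.mem_cons_self t]
    constructor
    · rintro ((h | h) | ⟨b, hb, hq⟩)
      · exact Or.inl h
      · exact Or.inr ⟨x, List.mem_cons_self, h⟩
      · exact Or.inr ⟨b, List.mem_cons_of_mem x hb, hq⟩
    · rintro (h | ⟨b, hb, hq⟩)
      · exact Or.inl (Or.inl h)
      · rcases List.mem_cons.mp hb with rfl | hb
        · exact Or.inl (Or.inr hq)
        · exact Or.inr ⟨b, hb, hq⟩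

-- generic Nodup preservation through a foldl
lemma pvFoldlNodup {α β : Type}
    (l : List β) (F : List α → β → List α)
    (hF : ∀ u b, u.Nodup → (F u b).Nodup) :
    ∀ u : List α, u.Nodup → (l.foldl F u).Nodup := by
  induction l with
  | nil => intro u hu; simpa using hu
  | cons x xs ih => intro u hu; exact ih _ (hF u x hu)

-- extending a substring by one character on the right
lemma pvSliceExtend (cs : List Char) (i k : Nat) (hik : i ≤ k) (hk : k < cs.length) :
    (cs.drop i).take (k + 1 - i) = (cs.drop i).take (k - i) ++ [cs[k]] := by
  have h1 : k + 1 - i = (k - i) + 1 := by omega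
  have h2 : k - i < (cs.drop i).length := by simp [List.length_drop]; omega
  have h3 : (cs.drop i)[k - i]'h2 = cs[k] := by
    rw [List.getElem_drop]; congr 1; omega
  rw [h1, List.take_add_one, List.getElem?_eq_getElem h2, h3]
  simp

-- A's inner loop: the running counter IS Counter(s[i:k]), and the substrings added are
-- exactly the valid slices s[i:e+1] for e in [k, len(s))
lemma pvInnerA (cs : List Char) (i : Nat) :
    ∀ (d : Nat) (k : Nat), k + d = cs.length → i ≤ k →
    ∀ (u : PySem.Set (List Char)) (t : List Char),
      t ∈ ((PySem.List.pyRange (k : Int) (cs.length : Int) 1).foldl (pvStepA cs (i : Int))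
            (PySem.Dict.counter ((cs.drop i).take (k - i)), u)).2 ↔
        t ∈ u ∨ ∃ e : Nat, k ≤ e ∧ e < cs.length ∧
          t = (cs.drop i).take (e + 1 - i) ∧ pvValidB t = true := by
  intro d
  induction d with
  | zero =>
    intro k hk hik u t
    have : (PySem.List.pyRange (k : Int) (cs.length : Int) 1) = [] := by
      apply PySem.List.pyRange_one_eq_nil; omega
    rw [this]
    simp only [List.foldl_nil]
    constructor
    · exact Or.inl
    · rintro (h | ⟨e, he1, he2, -⟩)
      · exact h
      · omega
  | succ d ih =>
    intro k hk hik u t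
    have hkL : k < cs.length := by omega
    have hcons : (PySem.List.pyRange (k : Int) (cs.length : Int) 1)
        = (k : Int) :: PySem.List.pyRange ((k : Int) + 1) (cs.length : Int) 1 := by
      apply PySem.List.pyRange_one_cons; exact_mod_cast hkL
    have hcast : ((k : Int) + 1) = ((k + 1 : Nat) : Int) := by push_cast; ring
    have hget : PySem.List.pyGet? cs (k : Int) = some cs[k] := PySem.List.pyGet?_ofNat cs k hkL
    have hslice : PySem.List.slice cs (some (i : Int)) (some ((k : Int) + 1))
        = (cs.drop i).take (k + 1 - i) := by
      rw [hcast, PySem.List.slice_natCast]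
    have hcounter : (PySem.Dict.counter ((cs.drop i).take (k - i))).modify cs[k] 0 (· + 1)
        = PySem.Dict.counter ((cs.drop i).take (k + 1 - i)) := by
      rw [pvSliceExtend cs i k hik hkL, PySem.Dict.counter_append_singleton]
    have hstep : pvStepA cs (i : Int) (PySem.Dict.counter ((cs.drop i).take (k - i)), u) (k : Int)
        = (PySem.Dict.counter ((cs.drop i).take (k + 1 - i)),
           if pvValidB ((cs.drop i).take (k + 1 - i)) then
             PySem.Set.add u ((cs.drop i).take (k + 1 - i)) else u) := by
      unfold pvStepA
      rw [hget]
      simp only [hcounter, hslice, pvIsValidA_counter]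
      split <;> rfl
    have hk1 : (k + 1) + d = cs.length := by omega
    have hik1 : i ≤ k + 1 := by omega
    rw [hcons, List.foldl_cons, hstep, hcast]
    rw [ih (k + 1) hk1 hik1 _ t]
    set T := (cs.drop i).take (k + 1 - i) with hT
    by_cases hv : pvValidB T
    · simp only [hv, if_true, PySem.Set.mem_add]
      constructor
      · rintro ((h | rfl) | ⟨e, he1, he2, he3, he4⟩)
        · exact Or.inl h
        · exact Or.inr ⟨k, le_refl k, hkL, rfl, hv⟩
        · exact Or.inr ⟨e, by omega, he2, he3, he4⟩
      · rintro (h | ⟨e, he1, he2, he3, he4⟩)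
        · exact Or.inl (Or.inl h)
        · rcases Nat.eq_or_lt_of_le he1 with rfl | hlt
          · exact Or.inl (Or.inr he3)
          · exact Or.inr ⟨e, by omega, he2, he3, he4⟩
    · simp only [hv]
      constructor
      · rintro (h | ⟨e, he1, he2, he3, he4⟩)
        · exact Or.inl h
        · exact Or.inr ⟨e, by omega, he2, he3, he4⟩
      · rintro (h | ⟨e, he1, he2, he3, he4⟩)
        · exact Or.inl h
        · rcases Nat.eq_or_lt_of_le he1 with rfl | hlt
          · rw [← hT] at he3
            subst he3
            exact absurd he4 (by simp [hv])
          · exact Or.inr ⟨e, by omega, he2, he3, he4⟩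

-- A's inner loop only ever Set.add's into the accumulated set: Nodup is preserved
lemma pvInnerANodup (cs : List Char) (i : Int) (l : List Int) :
    ∀ (st : PySem.Dict Char Int × PySem.Set (List Char)), st.2.Nodup →
      ((l.foldl (pvStepA cs i) st).2).Nodup := by
  induction l with
  | nil => intro st h; simpa using h
  | cons x xs ih =>
    intro st h
    rw [List.foldl_cons]
    apply ih
    unfold pvStepA
    cases PySem.List.pyGet? cs x with
    | none => exact h
    | some c =>
      simp only
      split
      · exact PySem.Set.nodup_add _ _ h
      · exact h

-- membership in A's final set: exactly the valid substrings
lemma pvMemA (cs : List Char) (t : List Char) :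
    t ∈ (PySem.List.pyRange 0 (cs.length : Int) 1).foldl
        (fun u start =>
          ((PySem.List.pyRange start (cs.length : Int) 1).foldl (pvStepA cs start)
            (PySem.Dict.empty, u)).2)
        PySem.Set.empty ↔
      ∃ i e : Nat, i ≤ e ∧ e < cs.length ∧
        t = (cs.drop i).take (e + 1 - i) ∧ pvValidB t = true := by
  rw [pvFoldlMem _ _
      (fun b t => ∃ e : Nat, b.toNat ≤ e ∧ e < cs.length ∧
        t = (cs.drop b.toNat).take (e + 1 - b.toNat) ∧ pvValidB t = true)
      ?_ PySem.Set.empty t]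
  · constructor
    · rintro (h | ⟨b, hb, e, he1, he2, he3, he4⟩)
      · simp [PySem.Set.empty] at h
      · exact ⟨b.toNat, e, he1, he2, he3, he4⟩
    · rintro ⟨i, e, he1, he2, he3, he4⟩
      refine Or.inr ⟨(i : Int), ?_, ?_⟩
      · rw [PySem.List.mem_pyRange_one]
        constructor
        · exact_mod_cast Nat.zero_le i
        · exact_mod_cast Nat.lt_of_le_of_lt he1 he2
      · simpa using ⟨e, he1, he2, he3, he4⟩
  · intro u b hb t
    rw [PySem.List.mem_pyRange_one] at hb
    obtain ⟨hb0, hbL⟩ := hb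
    have hbe : b = ((b.toNat : Nat) : Int) := (Int.toNat_of_nonneg hb0).symm
    have hempty : (PySem.Dict.empty : PySem.Dict Char Int)
        = PySem.Dict.counter ((cs.drop b.toNat).take (b.toNat - b.toNat)) := by
      simp [PySem.Dict.counter]
    rw [hbe, hempty]
    exact pvInnerA cs b.toNat (cs.length - b.toNat) b.toNat (by omega) (le_refl _) u t

-- membership in B's substring set: exactly the substrings
lemma pvMemB (cs : List Char) (t : List Char) :
    t ∈ (PySem.List.pyRange 0 (cs.length : Int) 1).foldl
        (fun u i =>
          (PySem.List.pyRange (i + 1) ((cs.length : Int) + 1) 1).foldl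
            (fun u j => PySem.Set.add u (PySem.List.slice cs (some i) (some j))) u)
        PySem.Set.empty ↔
      ∃ i e : Nat, i ≤ e ∧ e < cs.length ∧ t = (cs.drop i).take (e + 1 - i) := by
  rw [pvFoldlMem _ _
      (fun b t => ∃ j ∈ PySem.List.pyRange (b + 1) ((cs.length : Int) + 1) 1,
        t = PySem.List.slice cs (some b) (some j))
      (fun u b _ t => PySem.Set.mem_foldl_add _ _ u t) PySem.Set.empty t]
  constructor
  · rintro (h | ⟨b, hb, j, hj, rfl⟩)
    · simp [PySem.Set.empty] at h
    · rw [PySem.List.mem_pyRange_one] at hb hj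
      have hb0 : 0 ≤ b := hb.1
      have hj1 : b + 1 ≤ j := hj.1
      refine ⟨b.toNat, j.toNat - 1, by omega, by omega, ?_⟩
      have hbe : b = ((b.toNat : Nat) : Int) := (Int.toNat_of_nonneg hb0).symm
      have hje : j = ((j.toNat : Nat) : Int) := (Int.toNat_of_nonneg (by omega)).symm
      rw [hbe, hje, PySem.List.slice_natCast]
      congr 1
      omega
  · rintro ⟨i, e, he1, he2, rfl⟩
    refine Or.inr ⟨(i : Int), ?_, ((e + 1 : Nat) : Int), ?_, ?_⟩
    · rw [PySem.List.mem_pyRange_one]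
      exact ⟨by exact_mod_cast Nat.zero_le i, by exact_mod_cast Nat.lt_of_le_of_lt he1 he2⟩
    · rw [PySem.List.mem_pyRange_one]
      constructor
      · push_cast; omega
      · push_cast; omega
    · rw [PySem.List.slice_natCast]

-- the two result lists are permutations (both Nodup, same members), hence the counts agree
lemma pvMain (cs : List Char) :
    PySem.Set.len
      ((PySem.List.pyRange 0 (cs.length : Int) 1).foldl
        (fun u start =>
          ((PySem.List.pyRange start (cs.length : Int) 1).foldl (pvStepA cs start)
            (PySem.Dict.empty, u)).2)
        PySem.Set.empty) =
    ((((PySem.List.pyRange 0 (cs.length : Int) 1).foldl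
        (fun u i =>
          (PySem.List.pyRange (i + 1) ((cs.length : Int) + 1) 1).foldl
            (fun u j => PySem.Set.add u (PySem.List.slice cs (some i) (some j))) u)
        PySem.Set.empty).filter pvValidB).length : Int) := by
  have hAnodup := pvFoldlNodup (PySem.List.pyRange 0 (cs.length : Int) 1)
    (fun u start =>
      ((PySem.List.pyRange start (cs.length : Int) 1).foldl (pvStepA cs start)
        (PySem.Dict.empty, u)).2)
    (fun u b hu => pvInnerANodup cs b _ (PySem.Dict.empty, u) hu)
    PySem.Set.empty List.nodup_nil
  have hBnodup := pvFoldlNodup (PySem.List.pyRange 0 (cs.length : Int) 1)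
    (fun u i =>
      (PySem.List.pyRange (i + 1) ((cs.length : Int) + 1) 1).foldl
        (fun u j => PySem.Set.add u (PySem.List.slice cs (some i) (some j))) u)
    (fun u b hu => pvFoldlNodup _ _ (fun u' j hu' => PySem.Set.nodup_add u' _ hu') u hu)
    PySem.Set.empty List.nodup_nil
  have hperm : (((PySem.List.pyRange 0 (cs.length : Int) 1).foldl
        (fun u start =>
          ((PySem.List.pyRange start (cs.length : Int) 1).foldl (pvStepA cs start)
            (PySem.Dict.empty, u)).2)
        PySem.Set.empty)).Perm
      (((PySem.List.pyRange 0 (cs.length : Int) 1).foldl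
        (fun u i =>
          (PySem.List.pyRange (i + 1) ((cs.length : Int) + 1) 1).foldl
            (fun u j => PySem.Set.add u (PySem.List.slice cs (some i) (some j))) u)
        PySem.Set.empty).filter pvValidB) := by
    rw [List.perm_ext_iff_of_nodup hAnodup (hBnodup.filter _)]
    intro t
    rw [pvMemA, List.mem_filter, pvMemB]
    constructor
    · rintro ⟨i, e, h1, h2, h3, h4⟩; exact ⟨⟨i, e, h1, h2, h3⟩, h4⟩
    · rintro ⟨⟨i, e, h1, h2, h3⟩, h4⟩; exact ⟨i, e, h1, h2, h3, h4⟩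
  have hlen := hperm.length_eq
  simp only [PySem.Set.len]
  exact_mod_cast hlen

-- ===== VERDICT (by name: the statement is the Claim_ definition above) =====
theorem equalDigitFrequency_spec : Claim_equal_equalDigitFrequency := by
  intro s _
  show equalDigitFrequency s = equalDigitFrequency_alt s
  unfold equalDigitFrequency equalDigitFrequency_alt
  simp only [PySem.Str.len_eq]
  exact pvMain s.toList
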